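-- pv_equiv track=rewrite | github.com/dmahinc/Sales-Enablement | backend/app/api/batch_upload.py | _infer_material_type
-- ===== SOURCE A (Python) =====
-- def _infer_material_type(filename: str, reasoning: str = "") -> tuple:
--     """Infer material type and audience from filename and reasoning"""
--     filename_lower = filename.lower()
--     reasoning_lower = reasoning.lower()
--     combined = filename_lower + " " + reasoning_lower
--
--     # Material type inference
--     material_type = "product_brief"  # default
--
--     if any(kw in combined for kw in ["datasheet", "data sheet", "spec"]):
--         material_type = "datasheet"
--     elif any(kw in combined for kw in ["sales deck", "salesdeck", "pitch"]):
--         material_type = "sales_deck"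
--     elif any(kw in combined for kw in ["enablement", "enablement deck"]):
--         material_type = "sales_enablement_deck"
--     elif any(kw in combined for kw in ["portfolio", "overview"]):
--         material_type = "product_portfolio"
--     elif any(kw in combined for kw in ["catalog", "catalogue"]):
--         material_type = "product_catalog"
--
--     # Audience inference
--     audience = "internal"  # default
--
--     if any(kw in combined for kw in ["customer", "client", "external", "public"]):
--         audience = "customer_facing"
--     elif any(kw in combined for kw in ["shared", "both", "all"]):
--         audience = "shared_asset"
--
--     return material_type, audience
-- ===== SOURCE B (Python) =====
-- # Flat keyword -> (priority, label) map; one pass tracks the minimum-priority matched keyword.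
-- MATERIAL_TABLE = {
--     "datasheet": (0, "datasheet"), "data sheet": (0, "datasheet"), "spec": (0, "datasheet"),
--     "sales deck": (1, "sales_deck"), "salesdeck": (1, "sales_deck"), "pitch": (1, "sales_deck"),
--     "enablement": (2, "sales_enablement_deck"), "enablement deck": (2, "sales_enablement_deck"),
--     "portfolio": (3, "product_portfolio"), "overview": (3, "product_portfolio"),
--     "catalog": (4, "product_catalog"), "catalogue": (4, "product_catalog"),
-- }
--
-- AUDIENCE_TABLE = {
--     "customer": (0, "customer_facing"), "client": (0, "customer_facing"),
--     "external": (0, "customer_facing"), "public": (0, "customer_facing"),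
--     "shared": (1, "shared_asset"), "both": (1, "shared_asset"), "all": (1, "shared_asset"),
-- }
--
--
-- def _best_label(combined, table, default):
--     best = None
--     for kw, (pr, label) in table.items():
--         if kw in combined and (best is None or pr < best[0]):
--             best = (pr, label)
--     return default if best is None else best[1]
--
--
-- def _infer_material_type(filename: str, reasoning: str = "") -> tuple:
--     combined = filename.lower() + " " + reasoning.lower()
--     return (
--         _best_label(combined, MATERIAL_TABLE, "product_brief"),
--         _best_label(combined, AUDIENCE_TABLE, "internal"),
--     )
-- ===== Notes on version B (the rewrite author's own statement) =====
-- stated objective: alternative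
-- what changed: Replaced the ordered if/elif group cascades by a flat keyword->(priority,label) map scanned in ONE pass that tracks the minimum-priority matched keyword (no early exit, no per-group any); correct because the first matching group in A is exactly the matched keyword of least priority.
import Mathlib
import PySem

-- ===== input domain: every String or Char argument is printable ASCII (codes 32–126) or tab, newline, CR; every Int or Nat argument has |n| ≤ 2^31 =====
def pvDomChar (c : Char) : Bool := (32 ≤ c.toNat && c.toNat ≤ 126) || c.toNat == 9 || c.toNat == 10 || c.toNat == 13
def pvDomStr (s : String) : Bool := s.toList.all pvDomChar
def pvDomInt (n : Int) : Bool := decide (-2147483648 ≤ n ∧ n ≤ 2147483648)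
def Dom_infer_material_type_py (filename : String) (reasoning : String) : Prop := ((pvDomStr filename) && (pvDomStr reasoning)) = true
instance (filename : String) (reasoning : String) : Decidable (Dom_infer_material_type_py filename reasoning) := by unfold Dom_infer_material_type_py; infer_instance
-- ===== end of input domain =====

-- B replaces A's two if/elif group cascades by a flat keyword->(priority,label) table scanned in one min-tracking pass (alternative, data-driven; same cost).


-- ===== PORT A =====
-- literal transliteration of A: lowercase, concatenate, then two if/elif cascades of any-keyword tests
def infer_material_type_py (filename : String) (reasoning : String) : String × String :=
  let filename_lower := PySem.Chars.lower filename.toList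
  let reasoning_lower := PySem.Chars.lower reasoning.toList
  let combined := filename_lower ++ " ".toList ++ reasoning_lower
  let material_type :=
    if ["datasheet".toList, "data sheet".toList, "spec".toList].any
        (fun kw => PySem.Chars.isIn kw combined) then "datasheet"
    else if ["sales deck".toList, "salesdeck".toList, "pitch".toList].any
        (fun kw => PySem.Chars.isIn kw combined) then "sales_deck"
    else if ["enablement".toList, "enablement deck".toList].any
        (fun kw => PySem.Chars.isIn kw combined) then "sales_enablement_deck"
    else if ["portfolio".toList, "overview".toList].any
        (fun kw => PySem.Chars.isIn kw combined) then "product_portfolio"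
    else if ["catalog".toList, "catalogue".toList].any
        (fun kw => PySem.Chars.isIn kw combined) then "product_catalog"
    else "product_brief"
  let audience :=
    if ["customer".toList, "client".toList, "external".toList, "public".toList].any
        (fun kw => PySem.Chars.isIn kw combined) then "customer_facing"
    else if ["shared".toList, "both".toList, "all".toList].any
        (fun kw => PySem.Chars.isIn kw combined) then "shared_asset"
    else "internal"
  (material_type, audience)

-- ===== PORT B =====
-- B's flat keyword -> (priority, label) tables (dict -> association list, insertion order)
def pvMaterialTable : List (List Char × (Nat × String)) :=
  [ ("datasheet".toList, (0, "datasheet")), ("data sheet".toList, (0, "datasheet")),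
    ("spec".toList, (0, "datasheet")),
    ("sales deck".toList, (1, "sales_deck")), ("salesdeck".toList, (1, "sales_deck")),
    ("pitch".toList, (1, "sales_deck")),
    ("enablement".toList, (2, "sales_enablement_deck")),
    ("enablement deck".toList, (2, "sales_enablement_deck")),
    ("portfolio".toList, (3, "product_portfolio")), ("overview".toList, (3, "product_portfolio")),
    ("catalog".toList, (4, "product_catalog")), ("catalogue".toList, (4, "product_catalog")) ]

def pvAudienceTable : List (List Char × (Nat × String)) :=
  [ ("customer".toList, (0, "customer_facing")), ("client".toList, (0, "customer_facing")),
    ("external".toList, (0, "customer_facing")), ("public".toList, (0, "customer_facing")),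
    ("shared".toList, (1, "shared_asset")), ("both".toList, (1, "shared_asset")),
    ("all".toList, (1, "shared_asset")) ]

-- the loop body of Source B's one pass: keep the matched entry of least priority (first on ties)
def pvStep (c : List Char) : Option (Nat × String) → (List Char × (Nat × String)) → Option (Nat × String) :=
  fun best e =>
    if PySem.Chars.isIn e.1 c ∧ (best = none ∨ e.2.1 < (best.getD (0, "")).1)
    then some e.2 else best

def pvBestLabel (combined : List Char) (table : List (List Char × (Nat × String)))
    (dflt : String) : String :=
  match table.foldl (pvStep combined) none with
  | none => dflt
  | some b => b.2

def infer_material_type_py_alt (filename : String) (reasoning : String) : String × String :=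
  let combined := PySem.Chars.lower filename.toList ++ " ".toList ++ PySem.Chars.lower reasoning.toList
  (pvBestLabel combined pvMaterialTable "product_brief",
   pvBestLabel combined pvAudienceTable "internal")

-- ===== PRECONDITION & SPEC =====
def Spec_infer_material_type_py (filename : String) (reasoning : String) (out : String × String) : Prop := out = infer_material_type_py_alt filename reasoning
instance (filename : String) (reasoning : String) (out : String × String) : Decidable (Spec_infer_material_type_py filename reasoning out) := by unfold Spec_infer_material_type_py; infer_instance

-- ===== CLAIM (what is proved, stated in full; the proofs are below) =====
def Claim_equal_infer_material_type_py : Prop := ∀ (filename : String) (reasoning : String), Dom_infer_material_type_py filename reasoning → Spec_infer_material_type_py filename reasoning (infer_material_type_py filename reasoning)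

-- ===== LEMMAS AND PROOFS =====
-- proof-side helper: the first matching entry's label (what A's cascade computes, keyword-wise)
def pvFirst (c : List Char) (t : List (List Char × (Nat × String))) (d : String) : String :=
  match t with
  | [] => d
  | e :: rest => if PySem.Chars.isIn e.1 c then e.2.2 else pvFirst c rest d

-- once a best of minimal priority is held, later entries of ≥ priority never replace it
theorem pvKeep (c : List Char) (t : List (List Char × (Nat × String))) (acc : Nat × String)
    (h : ∀ e ∈ t, acc.1 ≤ e.2.1) : t.foldl (pvStep c) (some acc) = some acc := by
  induction t with
  | nil => rfl
  | cons e rest ih =>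
      have h1 : acc.1 ≤ e.2.1 := h e (by simp)
      have : pvStep c (some acc) e = some acc := by
        simp only [pvStep, Option.getD]
        rw [if_neg]; rintro ⟨-, h2 | h2⟩
        · simp at h2
        · omega
      simp only [List.foldl, this]
      exact ih (fun e he => h e (by simp [he]))

-- on a table with nondecreasing priorities the min-tracking pass is first-match
theorem pvBest_eq_first (c : List Char) (t : List (List Char × (Nat × String))) (d : String)
    (h : t.Pairwise (fun a b => a.2.1 ≤ b.2.1)) : pvBestLabel c t d = pvFirst c t d := by
  induction t with
  | nil => rfl
  | cons e rest ih =>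
      rcases List.pairwise_cons.mp h with ⟨hhead, htail⟩
      by_cases hm : PySem.Chars.isIn e.1 c
      · have hstep : pvStep c none e = some e.2 := by
          simp [pvStep, hm]
        simp only [pvBestLabel, pvFirst, List.foldl, hstep, hm, if_pos]
        rw [pvKeep c rest e.2 (fun x hx => hhead x hx)]
      · have hstep : pvStep c none e = none := by
          simp [pvStep, hm]
        simp only [pvBestLabel, pvFirst, List.foldl, hstep, hm, if_neg, Bool.false_eq_true,
          not_false_eq_true]
        exact ih htail

-- consecutive branches with the same result collapse to a disjunction
theorem pvIfSame {α : Type} (a b : Bool) (x y : α) :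
    (if a = true then x else if b = true then x else y) = (if (a || b) = true then x else y) := by
  cases a <;> cases b <;> simp

-- each classifier agrees once the per-keyword membership booleans are abstracted away
theorem pvMaterial_eq (c : List Char) :
    pvBestLabel c pvMaterialTable "product_brief" =
    (if ["datasheet".toList, "data sheet".toList, "spec".toList].any
        (fun kw => PySem.Chars.isIn kw c) then "datasheet"
    else if ["sales deck".toList, "salesdeck".toList, "pitch".toList].any
        (fun kw => PySem.Chars.isIn kw c) then "sales_deck"
    else if ["enablement".toList, "enablement deck".toList].any
        (fun kw => PySem.Chars.isIn kw c) then "sales_enablement_deck"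
    else if ["portfolio".toList, "overview".toList].any
        (fun kw => PySem.Chars.isIn kw c) then "product_portfolio"
    else if ["catalog".toList, "catalogue".toList].any
        (fun kw => PySem.Chars.isIn kw c) then "product_catalog"
    else "product_brief") := by
  rw [show pvBestLabel c pvMaterialTable "product_brief" = pvFirst c pvMaterialTable "product_brief"
        from pvBest_eq_first c _ _ (by decide)]
  simp only [pvFirst, pvMaterialTable, List.any_cons, List.any_nil]
  simp only [pvIfSame, Bool.or_false]

theorem pvAudience_eq (c : List Char) :
    pvBestLabel c pvAudienceTable "internal" =
    (if ["customer".toList, "client".toList, "external".toList, "public".toList].any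
        (fun kw => PySem.Chars.isIn kw c) then "customer_facing"
    else if ["shared".toList, "both".toList, "all".toList].any
        (fun kw => PySem.Chars.isIn kw c) then "shared_asset"
    else "internal") := by
  rw [show pvBestLabel c pvAudienceTable "internal" = pvFirst c pvAudienceTable "internal"
        from pvBest_eq_first c _ _ (by decide)]
  simp only [pvFirst, pvAudienceTable, List.any_cons, List.any_nil]
  simp only [pvIfSame, Bool.or_false]

-- ===== VERDICT (by name: the statement is the Claim_ definition above) =====
theorem infer_material_type_py_spec : Claim_equal_infer_material_type_py := by
  intro filename reasoning _
  unfold Spec_infer_material_type_py infer_material_type_py infer_material_type_py_alt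
  simp only []
  rw [pvMaterial_eq, pvAudience_eq]
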